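-- pv_equiv track=rewrite | github.com/cptnflump/Gomoku | GomokuAgentPlayer/player.py | get_rdiag
-- ===== SOURCE A (Python) =====
-- def get_tile(board, coords):
--     if (coords == None):
--         #print ("There is no tile here.")
--         return None, None
--
--     i, j = coords[0], coords[1]
--     if (i < 0 or i > len(board) - 1 or j < 0 or j > len(board) - 1):
--         return None, None
--     # print ("The tile at {} is {}.".format(tile, board[i][j]))
--     value = board[i][j]
--     return value, (i, j)
--
-- def get_topright(board, coords):
--     if (coords == None):
--         return None, None
--
--     i, j = coords[0] - 1, coords[1] + 1
--     if (i < 0 or j > len(board) - 1):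
--         #print ("There is no tile top-right of {}.".format(tile))
--         return None, None
--     else:
--         return get_tile(board, [i, j])
--
-- def get_botleft(board, coords):
--     if (coords == None):
--         return None, None
--     i, j = coords[0] + 1, coords[1] - 1
--     if (i > len(board) - 1 or j < 0):
--         #print ("There is no tile bottom-left of {}.".format(tile))
--         return None, None
--     else:
--         return get_tile(board, [i, j])
--
-- def get_rdiag(board, coords):
--     #print ("Tile selected: {}.".format(tile))
--
--     currentTile = get_tile(board, coords)
--     topright = get_topright(board, coords)
--     botleft = get_botleft(board, coords)
--
--     topright2 = get_topright(board, topright[1])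
--     botleft2 = get_botleft(board, botleft[1])
--
--     row = [topright2, topright, currentTile, botleft, botleft2]
--
--     sumOfRow = 0
--     for value in row:
--         #print (value)
--         if (value == None):
--             pass
--         elif (value[0] == 1):
--             sumOfRow += 1
--
--     return row
-- ===== SOURCE B (Python) =====
-- def get_rdiag(board, coords):
--     if coords is None:
--         return [(None, None)] * 5
--     n = len(board)
--     i, j = coords[0], coords[1]
--     row = []
--     for k in range(-2, 3):
--         r, c = i + k, j - k
--         if 0 <= r < n and 0 <= c < n:
--             row.append((board[r][c], (r, c)))
--         else:
--             row.append((None, None))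
--     return row
-- ===== Notes on version B (the rewrite author's own statement) =====
-- stated objective: simpler
-- what changed: A gathers the five diagonal tiles by chaining get_topright/get_botleft helper calls that thread the previous call's returned coordinates (plus a dead sum loop); B is one direct loop over the five offsets k=-2..2 computing (i+k, j-k) with a single bounds check.
-- intended difference: When coords sits exactly two steps off the board edge (i = n+1 or j = -2, resp. i = -2 or j = n+1) while the +-2 diagonal position lands back on the board, A returns (None, None) for that slot because its chained +-1 step was off-board, while B returns the actual on-board tile with its coordinates, which is the intended value since that tile exists on the board. — e.g. on get_rdiag([[1, 2, 3], [4, 5, 6], [7, 8, 9]], [4, -2]): A returns [(none, none), (none, none), (none, none), (none, none), (none, none)], B returns [(some 7, some (2, 0)), (none, none), (none, none), (none, none), (none, none)]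
import Mathlib
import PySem

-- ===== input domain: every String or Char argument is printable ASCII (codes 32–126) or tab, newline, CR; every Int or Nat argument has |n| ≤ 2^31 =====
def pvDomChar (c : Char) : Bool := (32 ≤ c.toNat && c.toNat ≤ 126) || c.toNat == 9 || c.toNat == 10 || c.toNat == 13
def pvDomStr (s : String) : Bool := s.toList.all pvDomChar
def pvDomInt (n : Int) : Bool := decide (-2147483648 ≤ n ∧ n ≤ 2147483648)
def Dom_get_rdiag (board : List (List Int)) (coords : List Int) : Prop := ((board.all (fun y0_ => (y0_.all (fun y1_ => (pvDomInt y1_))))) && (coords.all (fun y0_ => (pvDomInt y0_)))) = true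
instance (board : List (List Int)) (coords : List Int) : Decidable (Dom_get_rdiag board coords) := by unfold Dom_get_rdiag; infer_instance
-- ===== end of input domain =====

-- B replaces A's chain of topright/botleft helper calls by one direct loop over the
-- five diagonal offsets k = -2..2 (objective: simpler).

-- ===== PORT A =====
-- get_tile: coords is None or a pair [i, j] / (i, j).  board[i][j] is
-- PySem.List.pyGet? on each axis (exact; none = IndexError, excluded by Pre_,
-- with getD [] standing for the row only after the none case is excluded).
def pyGetTile (board : List (List Int)) (coords : Option (Int × Int)) :
    Option Int × Option (Int × Int) :=
  match coords with
  | none => (none, none)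
  | some (i, j) =>
    if i < 0 ∨ i > (board.length : Int) - 1 ∨ j < 0 ∨ j > (board.length : Int) - 1 then
      (none, none)
    else
      (PySem.List.pyGet? ((PySem.List.pyGet? board i).getD []) j, some (i, j))

def pyGetTopright (board : List (List Int)) (coords : Option (Int × Int)) :
    Option Int × Option (Int × Int) :=
  match coords with
  | none => (none, none)
  | some (ci, cj) =>
    let i := ci - 1
    let j := cj + 1
    if i < 0 ∨ j > (board.length : Int) - 1 then (none, none)
    else pyGetTile board (some (i, j))

def pyGetBotleft (board : List (List Int)) (coords : Option (Int × Int)) :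
    Option Int × Option (Int × Int) :=
  match coords with
  | none => (none, none)
  | some (ci, cj) =>
    let i := ci + 1
    let j := cj - 1
    if i > (board.length : Int) - 1 ∨ j < 0 then (none, none)
    else pyGetTile board (some (i, j))

-- coords[0] / coords[1]: getD is exact once Pre_ guarantees 2 ≤ coords.length.
def get_rdiag (board : List (List Int)) (coords : List Int) :
    List (Option Int × (Option (Int × Int))) :=
  let c : Option (Int × Int) := some (coords.getD 0 0, coords.getD 1 0)
  let currentTile := pyGetTile board c
  let topright := pyGetTopright board c
  let botleft := pyGetBotleft board c
  let topright2 := pyGetTopright board topright.2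
  let botleft2 := pyGetBotleft board botleft.2
  let row := [topright2, topright, currentTile, botleft, botleft2]
  -- dead sumOfRow loop of A, kept for fidelity and discarded
  let _ := row.foldl (fun s v => if v.1 = some 1 then s + 1 else s) (0 : Int)
  row

-- ===== PORT B =====
def get_rdiag_alt (board : List (List Int)) (coords : List Int) :
    List (Option Int × (Option (Int × Int))) :=
  let n := (board.length : Int)
  let i := coords.getD 0 0
  let j := coords.getD 1 0
  (PySem.List.pyRange (-2) 3 1).foldl
    (fun row k =>
      let r := i + k
      let c := j - k
      row ++ [if 0 ≤ r ∧ r < n ∧ 0 ≤ c ∧ c < n then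
                (PySem.List.pyGet? ((PySem.List.pyGet? board r).getD []) c, some (r, c))
              else (none, none)]) []

-- ===== PRECONDITION & SPEC =====
-- Pre_ excludes coords lists with fewer than two entries (A raises IndexError on
-- coords[1]) and boards whose row at an in-square diagonal position is too short
-- (ragged board: board[r][c] raises IndexError in A or in B — B reads the full
-- five-offset window, so it may raise on a ragged row A's chaining never reaches).
def Pre_get_rdiag (board : List (List Int)) (coords : List Int) : Prop :=
  2 ≤ coords.length ∧
  ∀ k ∈ ([-2, -1, 0, 1, 2] : List Int),
    (0 ≤ coords.getD 0 0 + k ∧ coords.getD 0 0 + k < (board.length : Int) ∧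
     0 ≤ coords.getD 1 0 - k ∧ coords.getD 1 0 - k < (board.length : Int)) →
    coords.getD 1 0 - k < ((board.getD (coords.getD 0 0 + k).toNat []).length : Int)

instance (board : List (List Int)) (coords : List Int) : Decidable (Pre_get_rdiag board coords) := by
  unfold Pre_get_rdiag; infer_instance

def pvWitness_get_rdiag : List (List Int) × List Int := ([[1, 2, 3], [4, 5, 6], [7, 8, 9]], [1, 1])

-- On coords two steps off the board edge (i = n+1 or j = -2 for the upper-right
-- half, i = -2 or j = n+1 for the lower-left half) whose ±2 diagonal position
-- lands back on the board, A returns (None, None) for that slot because its ±1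
-- chaining step is off-board, while B returns the actual tile there; B's value is
-- intended since that tile exists on the board.
-- orphan slot on one side: the ±1 chain step lands off-board while the ±2 tile is on-board
def pvOrphan (n i j : Int) : Prop :=
  (i = n + 1 ∧ -2 ≤ j ∧ j < n - 2) ∨ (j = -2 ∧ 2 ≤ i ∧ i < n + 2)

def D_get_rdiag (board : List (List Int)) (coords : List Int) : Prop :=
  pvOrphan board.length (coords.getD 0 0) (coords.getD 1 0) ∨
  pvOrphan board.length (coords.getD 1 0) (coords.getD 0 0)

instance (board : List (List Int)) (coords : List Int) : Decidable (D_get_rdiag board coords) := by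
  unfold D_get_rdiag pvOrphan; infer_instance

def Spec_get_rdiag (board : List (List Int)) (coords : List Int) (out : List (Option Int × (Option (Int × Int)))) : Prop := ¬ D_get_rdiag board coords → out = get_rdiag_alt board coords
instance (board : List (List Int)) (coords : List Int) (out : List (Option Int × (Option (Int × Int)))) : Decidable (Spec_get_rdiag board coords out) := by unfold Spec_get_rdiag; infer_instance

def pvDiffWitness_get_rdiag : List (List Int) × List Int := ([[1, 2, 3], [4, 5, 6], [7, 8, 9]], [4, -2])

def pvDiffWitnessOut_get_rdiag :
    (List (Option Int × (Option (Int × Int)))) × (List (Option Int × (Option (Int × Int)))) :=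
  ([(none, none), (none, none), (none, none), (none, none), (none, none)],
   [(some 7, some (2, 0)), (none, none), (none, none), (none, none), (none, none)])

-- ===== CLAIM (what is proved, stated in full; the proofs are below) =====
def Claim_unchanged_get_rdiag : Prop := ∀ (board : List (List Int)) (coords : List Int), Dom_get_rdiag board coords → Pre_get_rdiag board coords → Spec_get_rdiag board coords (get_rdiag board coords)
def Claim_changed_get_rdiag : Prop := Dom_get_rdiag (pvDiffWitness_get_rdiag.1) (pvDiffWitness_get_rdiag.2) ∧ Pre_get_rdiag (pvDiffWitness_get_rdiag.1) (pvDiffWitness_get_rdiag.2) ∧ D_get_rdiag (pvDiffWitness_get_rdiag.1) (pvDiffWitness_get_rdiag.2) ∧ get_rdiag (pvDiffWitness_get_rdiag.1) (pvDiffWitness_get_rdiag.2) = pvDiffWitnessOut_get_rdiag.1 ∧ get_rdiag_alt (pvDiffWitness_get_rdiag.1) (pvDiffWitness_get_rdiag.2) = pvDiffWitnessOut_get_rdiag.2 ∧ pvDiffWitnessOut_get_rdiag.1 ≠ pvDiffWitnessOut_get_rdiag.2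
def Claim_exact_get_rdiag : Prop := ∀ (board : List (List Int)) (coords : List Int), Dom_get_rdiag board coords → Pre_get_rdiag board coords → D_get_rdiag board coords → get_rdiag board coords ≠ get_rdiag_alt board coords

-- ===== LEMMAS AND PROOFS =====

-- the board access both ports share
def pvAcc (board : List (List Int)) (r c : Int) : Option Int × Option (Int × Int) :=
  (PySem.List.pyGet? ((PySem.List.pyGet? board r).getD []) c, some (r, c))

theorem pyGetTile_some (board : List (List Int)) (i j : Int) :
    pyGetTile board (some (i, j)) =
      if 0 ≤ i ∧ i < (board.length : Int) ∧ 0 ≤ j ∧ j < (board.length : Int) then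
        pvAcc board i j else (none, none) := by
  simp only [pyGetTile, pvAcc]
  split_ifs <;> first | rfl | omega

theorem pyGetTopright_some (board : List (List Int)) (i j : Int) :
    pyGetTopright board (some (i, j)) =
      if 0 ≤ i - 1 ∧ i - 1 < (board.length : Int) ∧ 0 ≤ j + 1 ∧ j + 1 < (board.length : Int) then
        pvAcc board (i - 1) (j + 1) else (none, none) := by
  simp only [pyGetTopright, pyGetTile_some]
  split_ifs with h1 h2 <;> first | rfl | omega

theorem pyGetBotleft_some (board : List (List Int)) (i j : Int) :
    pyGetBotleft board (some (i, j)) =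
      if 0 ≤ i + 1 ∧ i + 1 < (board.length : Int) ∧ 0 ≤ j - 1 ∧ j - 1 < (board.length : Int) then
        pvAcc board (i + 1) (j - 1) else (none, none) := by
  simp only [pyGetBotleft, pyGetTile_some]
  split_ifs with h1 h2 <;> first | rfl | omega

theorem pyRange_m2_3 : PySem.List.pyRange (-2) 3 1 = [-2, -1, 0, 1, 2] := by decide

-- B as an explicit five-entry map
theorem alt_eval (board : List (List Int)) (coords : List Int) :
    get_rdiag_alt board coords =
      ([-2, -1, 0, 1, 2] : List Int).map (fun k =>
        if 0 ≤ coords.getD 0 0 + k ∧ coords.getD 0 0 + k < (board.length : Int) ∧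
           0 ≤ coords.getD 1 0 - k ∧ coords.getD 1 0 - k < (board.length : Int) then
          pvAcc board (coords.getD 0 0 + k) (coords.getD 1 0 - k) else (none, none)) := by
  simp only [get_rdiag_alt, pyRange_m2_3, pvAcc, List.foldl, List.map, List.nil_append,
    List.cons_append]

theorem if_acc_congr (board : List (List Int)) {P Q : Prop} [Decidable P] [Decidable Q]
    {r c r' c' : Int} (hiff : P ↔ Q) (hrc : P → r = r' ∧ c = c') :
    (if P then pvAcc board r c else (none, none)) =
    (if Q then pvAcc board r' c' else (none, none)) := by
  split_ifs with h1 h2 h3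
  · rw [(hrc h1).1, (hrc h1).2]
  · exact absurd (hiff.mp h1) h2
  · exact absurd (hiff.mpr h3) h1
  · rfl

theorem slotTR2 (board : List (List Int)) (i j : Int)
    (hD : ¬ ((i = (board.length : Int) + 1 ∧ -2 ≤ j ∧ j < (board.length : Int) - 2) ∨
             (j = -2 ∧ 2 ≤ i ∧ i < (board.length : Int) + 2))) :
    pyGetTopright board (pyGetTopright board (some (i, j))).2 =
      if 0 ≤ i + -2 ∧ i + -2 < (board.length : Int) ∧ 0 ≤ j - -2 ∧ j - -2 < (board.length : Int)
      then pvAcc board (i + -2) (j - -2) else (none, none) := by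
  rw [pyGetTopright_some]
  by_cases hP : 0 ≤ i - 1 ∧ i - 1 < (board.length : Int) ∧ 0 ≤ j + 1 ∧ j + 1 < (board.length : Int)
  · rw [if_pos hP]
    show pyGetTopright board (some (i - 1, j + 1)) = _
    rw [pyGetTopright_some]
    exact if_acc_congr board (by constructor <;> intro _ <;> omega)
      (fun _ => ⟨by ring, by ring⟩)
  · rw [if_neg hP]
    show ((none, none) : Option Int × Option (Int × Int)) = _
    rw [if_neg (by omega)]

theorem slotBL2 (board : List (List Int)) (i j : Int)
    (hD : ¬ ((j = (board.length : Int) + 1 ∧ -2 ≤ i ∧ i < (board.length : Int) - 2) ∨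
             (i = -2 ∧ 2 ≤ j ∧ j < (board.length : Int) + 2))) :
    pyGetBotleft board (pyGetBotleft board (some (i, j))).2 =
      if 0 ≤ i + 2 ∧ i + 2 < (board.length : Int) ∧ 0 ≤ j - 2 ∧ j - 2 < (board.length : Int)
      then pvAcc board (i + 2) (j - 2) else (none, none) := by
  rw [pyGetBotleft_some]
  by_cases hP : 0 ≤ i + 1 ∧ i + 1 < (board.length : Int) ∧ 0 ≤ j - 1 ∧ j - 1 < (board.length : Int)
  · rw [if_pos hP]
    show pyGetBotleft board (some (i + 1, j - 1)) = _
    rw [pyGetBotleft_some]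
    exact if_acc_congr board (by constructor <;> intro _ <;> omega)
      (fun _ => ⟨by ring, by ring⟩)
  · rw [if_neg hP]
    show ((none, none) : Option Int × Option (Int × Int)) = _
    rw [if_neg (by omega)]

theorem unchanged_core (board : List (List Int)) (coords : List Int)
    (hD : ¬ D_get_rdiag board coords) : get_rdiag board coords = get_rdiag_alt board coords := by
  unfold D_get_rdiag pvOrphan at hD
  rw [not_or] at hD
  obtain ⟨hD1, hD2⟩ := hD
  rw [alt_eval]
  simp only [List.map, get_rdiag]
  rw [slotTR2 board _ _ hD1, slotBL2 board _ _ hD2, pyGetTopright_some, pyGetBotleft_some,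
    pyGetTile_some]
  simp only [List.cons.injEq, and_true]
  and_intros <;>
    first
      | rfl
      | trivial
      | exact if_acc_congr board (by constructor <;> intro _ <;> omega)
          (fun _ => ⟨by ring, by ring⟩)

theorem pyGetTopright_nn (board : List (List Int)) :
    pyGetTopright board ((none, none) : Option Int × Option (Int × Int)).2 = (none, none) := rfl

theorem pyGetBotleft_nn (board : List (List Int)) :
    pyGetBotleft board ((none, none) : Option Int × Option (Int × Int)).2 = (none, none) := rfl

-- ===== VERDICT (by name: the statement is the Claim_ definition above) =====
theorem get_rdiag_spec : Claim_unchanged_get_rdiag := by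
  intro board coords _ _ hD
  exact unchanged_core board coords hD

theorem get_rdiag_changed : Claim_changed_get_rdiag := by
  unfold Claim_changed_get_rdiag; decide

theorem get_rdiag_tight : Claim_exact_get_rdiag := by
  intro board coords _ _ hD heq
  simp only [get_rdiag, alt_eval, List.map] at heq
  unfold D_get_rdiag pvOrphan at hD
  rcases hD with hl | hr
  · rw [pyGetTopright_some, if_neg (show ¬ _ by omega), pyGetTopright_nn,
      if_pos (show (0:Int) ≤ coords.getD 0 0 + -2 ∧ _ by
        refine ⟨by omega, by omega, by omega, by omega⟩)] at heq
    simp only [List.cons.injEq] at heq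
    have h0 := heq.1
    simp [pvAcc, Prod.ext_iff] at h0
  · rw [pyGetBotleft_some, if_neg (show ¬ _ by omega), pyGetBotleft_nn,
      if_pos (show (0:Int) ≤ coords.getD 0 0 + 2 ∧ _ by
        refine ⟨by omega, by omega, by omega, by omega⟩)] at heq
    simp only [List.cons.injEq] at heq
    have h4 := heq.2.2.2.2.1
    simp [pvAcc, Prod.ext_iff] at h4
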